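-- pv_equiv track=rewrite | github.com/andyharless/sapphograms | fragment.py | best_aspect
-- ===== SOURCE A (Python) =====
-- from math import sqrt, floor, ceil
--
-- def best_aspect(array_length):
--     '''
--     Get pixel dimensions for an aspect ratio between 2:1 and 1:1 (inclusive)
--     that is a best fit for the total number of pixels to accommodate
--     '''
--     minwidth = ceil(sqrt(array_length))
--     maxwidth = floor(sqrt(2*array_length))
--
--     # First be optimistic and look for a perfect fit
--     for w in range(minwidth, maxwidth+1):
--         if not array_length % w:
--             return(w, array_length // w, 0)
--
--     best = (None, None, None)
--     best_npad = 99999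
--     for w in range(minwidth, maxwidth+1):
--         h = ceil(array_length / w)
--         npad = h * w - array_length
--         if npad < best_npad:
--             best = (w, h, npad)
--             best_npad = npad
--     return best
-- ===== SOURCE B (Python) =====
-- from math import isqrt
--
-- def best_aspect(array_length):
--     '''Single pass: for each candidate width keep the first strict minimum of
--     padding, returning immediately on a perfect fit.'''
--     lo = isqrt(array_length - 1) + 1        # ceil(sqrt(array_length))
--     hi = isqrt(2 * array_length)            # floor(sqrt(2*array_length))
--     best = None
--     for w in range(lo, hi + 1):
--         h = -(-array_length // w)           # ceil(array_length / w)
--         npad = h * w - array_length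
--         if npad == 0:
--             return (w, h, 0)
--         if best is None or npad < best[2]:
--             best = (w, h, npad)
--     return best
-- ===== Notes on version B (the rewrite author's own statement) =====
-- stated objective: simpler
-- what changed: A's two sequential scans over the width range (one hunting a perfect fit, one minimizing padding with a 99999 sentinel) are merged into a single pass using exact integer isqrt and ceil-div, returning early on a perfect fit and otherwise keeping the first strict minimum of padding.
-- outside the precondition, e.g. on best_aspect(0): A raises ZeroDivisionError, B raises ValueError
import Mathlib
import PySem

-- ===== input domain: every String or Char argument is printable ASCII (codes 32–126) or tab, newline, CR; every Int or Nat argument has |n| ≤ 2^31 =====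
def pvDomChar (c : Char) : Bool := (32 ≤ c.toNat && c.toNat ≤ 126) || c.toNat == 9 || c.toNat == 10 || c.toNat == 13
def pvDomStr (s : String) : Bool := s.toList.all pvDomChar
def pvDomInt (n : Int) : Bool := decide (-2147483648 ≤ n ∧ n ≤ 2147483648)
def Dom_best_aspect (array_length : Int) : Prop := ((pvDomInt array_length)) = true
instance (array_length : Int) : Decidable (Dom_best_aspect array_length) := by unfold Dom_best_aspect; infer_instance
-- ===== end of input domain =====

-- B merges A's two scans over the width range into one early-returning pass (objective: simpler).

-- ===== PORT A =====
-- A's float expressions ceil(sqrt(n)), floor(sqrt(2n)) and ceil(n/w) are ported as exact integer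
-- computations: for 0 ≤ n ≤ 2^31 IEEE double sqrt/division are correctly rounded and cannot cross
-- an integer boundary, so ceil/floor of them equal integer ceil/floor-sqrt and ceil-division.
def bestA_loop2 (n : Int) (ws : List Int) : Option (Int × Int × Int) × Int :=
  ws.foldl (fun st w =>
    let h := -(PySem.Int.floordiv (-n) w)      -- ceil(array_length / w)
    let npad := h * w - n
    if npad < st.2 then (some (w, h, npad), npad) else st)
    (none, 99999)

def best_aspect (array_length : Int) : Int × Int × Int :=
  let minwidth : Int := (Nat.sqrt (array_length - 1).toNat : Int) + 1   -- ceil(sqrt(array_length))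
  let maxwidth : Int := (Nat.sqrt (2 * array_length).toNat : Int)       -- floor(sqrt(2*array_length))
  let ws := PySem.List.pyRange minwidth (maxwidth + 1) 1
  -- first loop: look for a perfect fit
  match ws.find? (fun w => PySem.Int.mod array_length w == 0) with
  | some w => (w, PySem.Int.floordiv array_length w, 0)
  | none =>
    -- second loop: minimize padding
    match (bestA_loop2 array_length ws).1 with
    | some b => b
    | none => (0, 0, 0)   -- Python's (None, None, None): only when the range is empty, which 1 ≤ n prevents

-- ===== PORT B =====
def bestB_loop (n : Int) : List Int → Option (Int × Int × Int) → Int × Int × Int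
  | [], best => best.getD (0, 0, 0)            -- Python returns None if the loop never ran; 1 ≤ n prevents it
  | w :: ws, best =>
    let h := -(PySem.Int.floordiv (-n) w)      -- -(-array_length // w)
    let npad := h * w - n
    if npad = 0 then (w, h, 0)
    else
      let best' := match best with
        | none => some (w, h, npad)
        | some b => if npad < b.2.2 then some (w, h, npad) else best
      bestB_loop n ws best'

def best_aspect_alt (array_length : Int) : Int × Int × Int :=
  let lo : Int := (Nat.sqrt (array_length - 1).toNat : Int) + 1    -- isqrt(array_length - 1) + 1
  let hi : Int := (Nat.sqrt (2 * array_length).toNat : Int)        -- isqrt(2 * array_length)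
  bestB_loop array_length (PySem.List.pyRange lo (hi + 1) 1) none

-- ===== PRECONDITION & SPEC =====
-- Pre_ excludes exactly array_length ≤ 0, where A raises (ZeroDivisionError at 0, ValueError from sqrt below 0).
def Pre_best_aspect (array_length : Int) : Prop := 1 ≤ array_length
instance (array_length : Int) : Decidable (Pre_best_aspect array_length) := by unfold Pre_best_aspect; infer_instance
def pvWitness_best_aspect : Int := 7

def Spec_best_aspect (array_length : Int) (out : Int × Int × Int) : Prop := out = best_aspect_alt array_length
instance (array_length : Int) (out : Int × Int × Int) : Decidable (Spec_best_aspect array_length out) := by unfold Spec_best_aspect; infer_instance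

-- ===== CLAIM (what is proved, stated in full; the proofs are below) =====
def Claim_equal_best_aspect : Prop := ∀ (array_length : Int), Dom_best_aspect array_length → Pre_best_aspect array_length → Spec_best_aspect array_length (best_aspect array_length)

-- ===== LEMMAS AND PROOFS =====

-- npad at width w is the (Python) remainder of -n by w
theorem npad_eq_mod (n w : Int) : -(PySem.Int.floordiv (-n) w) * w - n = PySem.Int.mod (-n) w := by
  have h := PySem.Int.floordiv_mul_add_mod (-n) w
  linarith

theorem npad_bounds (n w : Int) (hw : 0 < w) :
    0 ≤ -(PySem.Int.floordiv (-n) w) * w - n ∧ -(PySem.Int.floordiv (-n) w) * w - n < w := by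
  rw [npad_eq_mod]
  exact ⟨PySem.Int.mod_nonneg _ hw, PySem.Int.mod_lt _ hw⟩

theorem npad_zero_iff (n w : Int) :
    (-(PySem.Int.floordiv (-n) w) * w - n = 0) ↔ PySem.Int.mod n w = 0 := by
  rw [npad_eq_mod, PySem.Int.mod_eq_zero_iff_dvd, PySem.Int.mod_eq_zero_iff_dvd, dvd_neg]

theorem ceil_eq_floordiv_of_dvd (n w : Int) (hw : w ≠ 0) (hdvd : PySem.Int.mod n w = 0) :
    -(PySem.Int.floordiv (-n) w) = PySem.Int.floordiv n w := by
  have h2 := PySem.Int.floordiv_mul_add_mod n w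
  have hz : -(PySem.Int.floordiv (-n) w) * w - n = 0 := (npad_zero_iff n w).mpr hdvd
  rw [hdvd] at h2
  have : -(PySem.Int.floordiv (-n) w) * w = PySem.Int.floordiv n w * w := by linarith
  exact mul_right_cancel₀ hw this

-- case "some width divides n": B's single loop returns the first perfect fit, from any accumulator
theorem bestB_find_some (n : Int) (ws : List Int) (hpos : ∀ w ∈ ws, 0 < w)
    (w₀ : Int) (hfind : ws.find? (fun w => PySem.Int.mod n w == 0) = some w₀)
    (best : Option (Int × Int × Int)) :
    bestB_loop n ws best = (w₀, PySem.Int.floordiv n w₀, 0) := by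
  induction ws generalizing best with
  | nil => simp at hfind
  | cons w ws ih =>
    have hw : 0 < w := hpos w (by simp)
    by_cases hmod : PySem.Int.mod n w = 0
    · rw [List.find?_cons_of_pos (by simp [hmod])] at hfind
      obtain rfl : w = w₀ := Option.some_inj.mp hfind
      simp only [bestB_loop]
      rw [if_pos ((npad_zero_iff n w).mpr hmod), ceil_eq_floordiv_of_dvd n w (by omega) hmod]
    · rw [List.find?_cons_of_neg (by simp [hmod])] at hfind
      simp only [bestB_loop]
      rw [if_neg (fun h => hmod ((npad_zero_iff n w).mp h))]
      exact ih (fun x hx => hpos x (by simp [hx])) hfind _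

-- case "no width divides n": the two loops run in lockstep
theorem bestB_lockstep (n : Int) (ws : List Int)
    (hb : ∀ w ∈ ws, 0 < w ∧ w < 99999)
    (hnd : ∀ w ∈ ws, PySem.Int.mod n w ≠ 0)
    (best : Option (Int × Int × Int)) (np : Int)
    (hinv : np = (match best with | none => 99999 | some b => b.2.2)) :
    bestB_loop n ws best =
      (match (ws.foldl (fun st w =>
          let h := -(PySem.Int.floordiv (-n) w)
          let npad := h * w - n
          if npad < st.2 then (some (w, h, npad), npad) else st) (best, np)).1 with
        | some b => b
        | none => ((0 : Int), (0 : Int), (0 : Int))) := by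
  induction ws generalizing best np with
  | nil =>
    cases best <;> simp [bestB_loop, List.foldl, hinv, Option.getD]
  | cons w ws ih =>
    have hw := hb w (by simp)
    have hmod := hnd w (by simp)
    have hnz : -(PySem.Int.floordiv (-n) w) * w - n ≠ 0 :=
      fun h => hmod ((npad_zero_iff n w).mp h)
    have hlt : -(PySem.Int.floordiv (-n) w) * w - n < 99999 := by
      have := (npad_bounds n w hw.1).2; omega
    simp only [bestB_loop, List.foldl]
    rw [if_neg hnz]
    cases best with
    | none =>
      subst hinv
      rw [if_pos hlt]
      exact ih (fun x hx => hb x (by simp [hx])) (fun x hx => hnd x (by simp [hx])) _ _ rfl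
    | some b =>
      subst hinv
      by_cases hcmp : -(PySem.Int.floordiv (-n) w) * w - n < b.2.2
      · rw [if_pos hcmp]
        simp only [hcmp, if_true]
        exact ih (fun x hx => hb x (by simp [hx])) (fun x hx => hnd x (by simp [hx])) _ _ rfl
      · rw [if_neg hcmp]
        simp only [hcmp, if_false]
        exact ih (fun x hx => hb x (by simp [hx])) (fun x hx => hnd x (by simp [hx])) _ _ rfl

-- every candidate width is positive and far below A's 99999 sentinel
theorem mem_ws_bounds (n w : Int) (hn : 1 ≤ n) (hn2 : n ≤ 2147483648)
    (hmem : w ∈ PySem.List.pyRange ((Nat.sqrt (n - 1).toNat : Int) + 1)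
      ((Nat.sqrt (2 * n).toNat : Int) + 1) 1) :
    0 < w ∧ w < 99999 := by
  rw [PySem.List.mem_pyRange_one] at hmem
  have h1 : (0 : Int) ≤ (Nat.sqrt (n - 1).toNat : Int) := Int.natCast_nonneg _
  have h2 : Nat.sqrt (2 * n).toNat < 99999 := by
    have hle : (2 * n).toNat ≤ 4294967296 := by omega
    have := Nat.sqrt_le_sqrt hle
    have h99 : Nat.sqrt 4294967296 < 99999 := by
      have : 4294967296 < 99999 * 99999 := by norm_num
      exact Nat.sqrt_lt'.mpr (by norm_num)
    omega
  constructor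
  · omega
  · have : (Nat.sqrt (2 * n).toNat : Int) < 99999 := by exact_mod_cast h2
    omega

-- ===== VERDICT (by name: the statement is the Claim_ definition above) =====
theorem best_aspect_spec : Claim_equal_best_aspect := by
  intro n hdom hpre
  unfold Spec_best_aspect best_aspect best_aspect_alt
  have hn2 : n ≤ 2147483648 := by
    unfold Dom_best_aspect pvDomInt at hdom; simp at hdom; exact hdom.2
  simp only []
  set ws := PySem.List.pyRange ((Nat.sqrt (n - 1).toNat : Int) + 1)
      ((Nat.sqrt (2 * n).toNat : Int) + 1) 1 with hws
  have hb : ∀ w ∈ ws, 0 < w ∧ w < 99999 := fun w hw => mem_ws_bounds n w hpre hn2 hw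
  cases hfind : ws.find? (fun w => PySem.Int.mod n w == 0) with
  | some w₀ =>
    rw [(bestB_find_some n ws (fun w hw => (hb w hw).1) w₀ hfind none)]
  | none =>
    have hnd : ∀ w ∈ ws, PySem.Int.mod n w ≠ 0 := by
      intro w hw hz
      have := List.find?_eq_none.mp hfind w hw
      simp [hz] at this
    rw [bestB_lockstep n ws hb hnd none 99999 rfl]
    rfl
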